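-- pv_equiv track=rewrite | github.com/hongzzi-zzi/epper | epper15_3.py | solution
-- ===== SOURCE A (Python) =====
-- def solution(n,m):
--     ans=0
--     while True:
--         n-=1
--         ans+=1
--         if ans%m==0:
--             n+=1
--         if n==0:
--             break
--     return ans
-- ===== SOURCE B (Python) =====
-- def solution(n, m):
--     # closed form: after t steps the counter is n - t + floor(t/|m|);
--     # the first t >= 1 with that zero is t = n + (n-1)//(|m|-1)
--     M = abs(m)
--     return n + (n - 1) // (M - 1)
-- ===== Notes on version B (the rewrite author's own statement) =====
-- stated objective: faster
-- what changed: Replaced the step-by-step countdown loop (one iteration per answer step) by the closed-form solution t = n + (n-1)//(|m|-1) of t - floor(t/|m|) = n.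
-- outside the precondition, e.g. on solution(0, 1): A returns 1, B raises ZeroDivisionError; on solution(0, -1): A returns 1, B raises ZeroDivisionError
import Mathlib
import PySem

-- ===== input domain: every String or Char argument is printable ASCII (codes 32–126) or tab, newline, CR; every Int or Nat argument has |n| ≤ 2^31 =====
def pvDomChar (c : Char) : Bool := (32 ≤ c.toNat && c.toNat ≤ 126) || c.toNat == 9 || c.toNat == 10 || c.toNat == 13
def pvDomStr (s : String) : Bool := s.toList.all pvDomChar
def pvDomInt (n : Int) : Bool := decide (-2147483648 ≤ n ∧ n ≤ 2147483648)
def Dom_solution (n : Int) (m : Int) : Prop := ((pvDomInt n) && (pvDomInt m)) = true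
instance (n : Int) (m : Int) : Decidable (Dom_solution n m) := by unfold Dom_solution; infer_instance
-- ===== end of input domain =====

-- B replaces A's step-by-step countdown loop by the O(1) closed form n + (n-1)//(|m|-1).


-- ===== PORT A =====
-- the 'while True' loop, fuel-bounded; inside Pre_solution the fuel 2*n+2 is never exhausted
def solutionLoopA (fuel : Nat) (m n ans : Int) : Int :=
  match fuel with
  | 0 => ans
  | f + 1 =>
    let n1 := n - 1
    let ans1 := ans + 1
    let n2 := if PySem.Int.mod ans1 m = 0 then n1 + 1 else n1
    if n2 = 0 then ans1 else solutionLoopA f m n2 ans1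

def solution (n : Int) (m : Int) : Int := solutionLoopA (2 * n.toNat + 2) m n 0

-- ===== PORT B =====
def solution_alt (n : Int) (m : Int) : Int :=
  n + PySem.Int.floordiv (n - 1) ((m.natAbs : Int) - 1)

-- ===== PRECONDITION & SPEC =====
-- A raises ZeroDivisionError at m = 0 and loops forever on the other inputs outside Pre_,
-- except the degenerate corner n = 0, m = ±1 (A returns 1 there by accident of the
-- post-increment break check; B's closed form divides by zero), which Pre_ also excludes.
def Pre_solution (n : Int) (m : Int) : Prop := 1 ≤ n ∧ (2 ≤ m ∨ m ≤ -2)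
instance (n : Int) (m : Int) : Decidable (Pre_solution n m) := by unfold Pre_solution; infer_instance
def pvWitness_solution : Int × Int := (3, 2)

def Spec_solution (n : Int) (m : Int) (out : Int) : Prop := out = solution_alt n m
instance (n : Int) (m : Int) (out : Int) : Decidable (Spec_solution n m out) := by unfold Spec_solution; infer_instance

-- ===== CLAIM (what is proved, stated in full; the proofs are below) =====
def Claim_equal_solution : Prop := ∀ (n : Int) (m : Int), Dom_solution n m → Pre_solution n m → Spec_solution n m (solution n m)

-- ===== LEMMAS AND PROOFS =====

-- A's loop condition 'ans % m == 0' is divisibility by |m|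
lemma mod_cond_iff (ans m : Int) :
    PySem.Int.mod ans m = 0 ↔ ans % (m.natAbs : Int) = 0 := by
  rw [PySem.Int.mod_eq_zero_iff_dvd]
  constructor
  · intro h; exact Int.emod_eq_zero_of_dvd ((Int.natAbs_dvd).mpr h)
  · intro h; exact (Int.natAbs_dvd).mp (Int.dvd_of_emod_eq_zero h)

-- dividing out one whole block of M-1 net decrements
lemma div_block (a M : Int) (hM : 2 ≤ M) :
    (a + (M - 1)) / (M - 1) = a / (M - 1) + 1 := by
  have h := Int.add_mul_ediv_right a 1 (show M - 1 ≠ 0 by omega)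
  simpa using h

-- loop invariant: with M = |m| ≥ 2, n ≥ 1, enough fuel, the loop returns
-- ans + n + (n - 1 + ans % M) / (M - 1)
lemma loopA_eq (f : Nat) : ∀ (m n ans : Int),
    (2:Int) ≤ (m.natAbs : Int) → 1 ≤ n → 0 ≤ ans →
    n + (n - 1 + ans % (m.natAbs : Int)) / ((m.natAbs : Int) - 1) ≤ (f : Int) →
    solutionLoopA f m n ans = ans + n + (n - 1 + ans % (m.natAbs : Int)) / ((m.natAbs : Int) - 1) := by
  induction f with
  | zero =>
    intro m n ans hM hn ha hf
    exfalso
    have hr0 : 0 ≤ ans % (m.natAbs : Int) :=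
      Int.emod_nonneg ans (by omega)
    have hdiv : 0 ≤ (n - 1 + ans % (m.natAbs : Int)) / ((m.natAbs : Int) - 1) :=
      Int.ediv_nonneg (by omega) (by omega)
    simp only [Nat.cast_zero] at hf
    linarith
  | succ f ih =>
    intro m n ans hM hn ha hf
    have hM0 : (m.natAbs : Int) ≠ 0 := by omega
    have hr0 : 0 ≤ ans % (m.natAbs : Int) := Int.emod_nonneg ans hM0
    have hrM : ans % (m.natAbs : Int) < (m.natAbs : Int) :=
      Int.emod_lt_of_pos ans (by omega)
    have h1M : (1:Int) % (m.natAbs : Int) = 1 := Int.emod_eq_of_lt (by omega) (by omega)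
    have hfc : ((f + 1 : Nat) : Int) = (f : Int) + 1 := by push_cast; ring
    rw [hfc] at hf
    by_cases hc : ans % (m.natAbs : Int) = (m.natAbs : Int) - 1
    · -- ans+1 is a multiple of M: the counter is re-incremented
      have hdvd : (ans + 1) % (m.natAbs : Int) = 0 := by
        rw [Int.add_emod, h1M, hc]
        simp
      have hcond : PySem.Int.mod (ans + 1) m = 0 := (mod_cond_iff _ _).mpr hdvd
      have hkey : (n - 1 + ((m.natAbs : Int) - 1)) / ((m.natAbs : Int) - 1)
          = (n - 1) / ((m.natAbs : Int) - 1) + 1 := div_block _ _ hM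
      simp only [solutionLoopA, hcond, if_true]
      rw [if_neg (show ¬ (n - 1 + 1 = 0) by omega)]
      rw [ih m (n - 1 + 1) (ans + 1) hM (by omega) (by omega) ?_]
      · rw [hdvd]
        have e1 : n - 1 + 1 - 1 + 0 = n - 1 := by ring
        rw [e1, hc, hkey]
        ring
      · rw [hc] at hf
        have e1 : n - 1 + 1 - 1 + 0 = n - 1 := by ring
        rw [hdvd, e1]
        linarith [hkey]
    · -- no increment: the counter just goes down by one
      have hr' : (ans + 1) % (m.natAbs : Int) = ans % (m.natAbs : Int) + 1 := by
        rw [Int.add_emod, h1M]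
        exact Int.emod_eq_of_lt (by omega) (by omega)
      have hcond : ¬ PySem.Int.mod (ans + 1) m = 0 := by
        rw [mod_cond_iff, hr']; omega
      simp only [solutionLoopA, hcond, if_false]
      by_cases hn1 : n = 1
      · subst hn1
        rw [if_pos (by ring)]
        have hz : (1 - 1 + ans % (m.natAbs : Int)) / ((m.natAbs : Int) - 1) = 0 :=
          Int.ediv_eq_zero_of_lt (by omega) (by omega)
        rw [hz]; ring
      · rw [if_neg (by omega)]
        rw [ih m (n - 1) (ans + 1) hM (by omega) (by omega) ?_]
        · rw [hr']
          have e1 : n - 1 - 1 + (ans % (m.natAbs : Int) + 1) = n - 1 + ans % (m.natAbs : Int) := by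
            ring
          rw [e1]; ring
        · rw [hr']
          have e1 : n - 1 - 1 + (ans % (m.natAbs : Int) + 1) = n - 1 + ans % (m.natAbs : Int) := by
            ring
          rw [e1]
          linarith

-- ===== VERDICT (by name: the statement is the Claim_ definition above) =====
theorem solution_spec : Claim_equal_solution := by
  intro n m _hdom hpre
  obtain ⟨hn, hm⟩ := hpre
  have hM : (2:Int) ≤ (m.natAbs : Int) := by
    rcases hm with h | h <;> omega
  have hz : (n - 1 + (0:Int) % (m.natAbs : Int)) = n - 1 := by
    rw [Int.zero_emod]; ring
  have hfuel : n + (n - 1 + (0:Int) % (m.natAbs : Int)) / ((m.natAbs : Int) - 1)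
      ≤ ((2 * n.toNat + 2 : Nat) : Int) := by
    have h2 : (n - 1) / ((m.natAbs : Int) - 1) ≤ n - 1 :=
      Int.ediv_le_self _ (by omega)
    have h3 : ((2 * n.toNat + 2 : Nat) : Int) = 2 * n + 2 := by
      push_cast [Int.toNat_of_nonneg (show (0:Int) ≤ n by omega)]; ring
    rw [hz, h3]
    linarith
  unfold Spec_solution solution solution_alt
  rw [loopA_eq (2 * n.toNat + 2) m n 0 hM hn le_rfl hfuel, hz,
    PySem.Int.floordiv_eq_ediv_of_pos (by omega)]
  ring
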